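-- pv_equiv track=rewrite | github.com/WorldCount/rpochecker | postparser/postfile.py | _postOpen
-- ===== SOURCE A (Python) =====
-- def _postOpen(link):
--     """ Открывает и парсит почтовый файл """
--
--     # Список с результатом
--     myList = []
--
--     # и читаем построчно
--     for line in link:
--
--         # Если строка пустая, то пропускаем её
--         if line == "\n":
--             continue
--
--         # Символ для разбора
--         line2 = line[0]
--
--         # Если это число, или буква "о", тогда добавляем в список
--         if line2.isdigit() or line2.lower() == "o":
--             tmpLine = line.rstrip().split("|")
--             myList.append(tmpLine)
--         # Если нет, то находим предыдущий элемент и добавляем строку к нему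
--         else:
--             myList[-1][-1] = myList[-1][-1] + line.rstrip()
--
--     # Возвращаем распарсенный список
--     return myList
-- ===== SOURCE B (Python) =====
-- def _postOpen(link):
--     """Two-pass re-implementation: group lines into records first, then format each group."""
--     # Pass 1: group the lines. A record group is (header line, [continuation lines]).
--     groups = []
--     for line in link:
--         if line == "\n":
--             continue
--         c = line[0]
--         if c.isdigit() or c.lower() == "o":
--             groups.append((line, []))
--         else:
--             groups[-1][1].append(line)
--     # Pass 2: turn each group into a record.
--     result = []
--     for first, conts in groups:
--         fields = first.rstrip().split("|")
--         tail = ""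
--         for cont in conts:
--             tail += cont.rstrip()
--         fields[-1] = fields[-1] + tail
--         result.append(fields)
--     return result
-- ===== Notes on version B (the rewrite author's own statement) =====
-- stated objective: alternative
-- what changed: Replaces A's single pass that mutates the last field of the last finished record on every continuation line with a two-phase pipeline: first group lines into (header, continuations) pairs, then format each group once by splitting the header and appending the concatenated continuations to the last field.
import Mathlib
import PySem

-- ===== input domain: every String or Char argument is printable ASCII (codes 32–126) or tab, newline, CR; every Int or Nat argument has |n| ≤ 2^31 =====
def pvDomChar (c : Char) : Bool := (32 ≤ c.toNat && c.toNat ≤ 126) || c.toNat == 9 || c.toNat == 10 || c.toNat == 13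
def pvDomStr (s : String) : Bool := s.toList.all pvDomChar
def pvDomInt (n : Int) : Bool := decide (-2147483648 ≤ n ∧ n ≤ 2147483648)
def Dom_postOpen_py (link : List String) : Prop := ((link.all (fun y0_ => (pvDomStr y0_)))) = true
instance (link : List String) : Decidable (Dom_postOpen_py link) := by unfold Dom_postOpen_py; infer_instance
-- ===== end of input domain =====

-- B re-implements A as a two-phase pipeline (group lines into records, then format each group);
-- same return value; neither version mutates its argument.

-- shared helper: xs[-1] = f(xs[-1]) (Python mutation of the last element; no-op on [] where Python raises, excluded by Pre_)
def updLast {α : Type} (f : α → α) : List α → List α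
  | [] => []
  | [a] => [f a]
  | a :: b :: rest => a :: updLast f (b :: rest)

-- s.split("|"); exact via PySem.Chars.splitOn (separator is nonempty)
def splitBar (s : String) : List String :=
  (PySem.Chars.splitOn s.toList "|".toList).map String.ofList

-- ===== PORT A =====
-- loop body of A's single for-loop over the lines
def aStep (myList : List (List String)) (line : String) : List (List String) :=
  if line == "\n" then myList
  else
    match PySem.Str.pyGet? line 0 with   -- line2 = line[0]; none = IndexError (excluded by Pre_)
    | none => myList
    | some line2 =>
      if PySem.Chars.isdigit line2 || (PySem.Chars.lowerChar line2 == 'o') then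
        myList ++ [splitBar (PySem.Str.rstrip line)]
      else
        updLast (updLast (fun s => s ++ PySem.Str.rstrip line)) myList  -- myList[-1][-1] += line.rstrip()

def postOpen_py (link : List String) : List (List String) :=
  link.foldl aStep []

-- ===== PORT B =====
-- pass 1: group the lines into (header, continuation lines) pairs
def bStep (groups : List (String × List String)) (line : String) : List (String × List String) :=
  if line == "\n" then groups
  else
    match PySem.Str.pyGet? line 0 with   -- c = line[0]; none = IndexError (excluded by Pre_)
    | none => groups
    | some c =>
      if PySem.Chars.isdigit c || (PySem.Chars.lowerChar c == 'o') then
        groups ++ [(line, [])]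
      else
        updLast (fun g => (g.1, g.2 ++ [line])) groups  -- groups[-1][1].append(line)

-- pass 2: turn one group into a record
def finRec (g : String × List String) : List String :=
  updLast (fun s => s ++ g.2.foldl (fun t cont => t ++ PySem.Str.rstrip cont) "")
    (splitBar (PySem.Str.rstrip g.1))

def postOpen_py_alt (link : List String) : List (List String) :=
  (link.foldl bStep []).map finRec

-- ===== PRECONDITION & SPEC =====
-- does this line start a new record? (first char a digit or 'o'/'O')
def startsRecord (l : String) : Bool :=
  match PySem.Str.pyGet? l 0 with
  | none => false
  | some c => PySem.Chars.isdigit c || (PySem.Chars.lowerChar c == 'o')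

-- Pre_ excludes exactly the inputs where the Python raises IndexError: an empty-string line
-- (line[0] fails) or a first non-"\n" line that does not start a record (myList[-1] on []).
def Pre_postOpen_py (link : List String) : Prop :=
  (∀ l ∈ link, l ≠ "") ∧
  (∀ l ∈ (link.dropWhile (· == "\n")).take 1, startsRecord l = true)
instance (link : List String) : Decidable (Pre_postOpen_py link) := by
  unfold Pre_postOpen_py; infer_instance

def pvWitness_postOpen_py : List String := ["1|a|b\n", "cont\n", "\n", "o|x\n"]

def Spec_postOpen_py (link : List String) (out : List (List String)) : Prop := out = postOpen_py_alt link
instance (link : List String) (out : List (List String)) : Decidable (Spec_postOpen_py link out) := by unfold Spec_postOpen_py; infer_instance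

-- ===== CLAIM (what is proved, stated in full; the proofs are below) =====
def Claim_equal_postOpen_py : Prop := ∀ (link : List String), Dom_postOpen_py link → Pre_postOpen_py link → Spec_postOpen_py link (postOpen_py link)

-- ===== LEMMAS AND PROOFS =====

lemma updLast_updLast {α : Type} (f g : α → α) :
    ∀ xs : List α, updLast f (updLast g xs) = updLast (fun x => f (g x)) xs
  | [] => rfl
  | [_] => rfl
  | a :: b :: r => by
    obtain ⟨c, s, hc⟩ : ∃ c s, updLast g (b :: r) = c :: s := by
      cases r with
      | nil => exact ⟨g b, [], rfl⟩
      | cons x y => exact ⟨b, updLast g (x :: y), rfl⟩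
    simp only [updLast, hc]
    rw [← hc]
    exact congrArg _ (updLast_updLast f g (b :: r))

lemma updLast_congr {α : Type} (f g : α → α) (h : ∀ x, f x = g x) (xs : List α) :
    updLast f xs = updLast g xs := by
  have : f = g := funext h
  rw [this]

lemma updLast_id {α : Type} (f : α → α) (h : ∀ x, f x = x) :
    ∀ xs : List α, updLast f xs = xs
  | [] => rfl
  | [a] => congrArg (fun x => [x]) (h a)
  | a :: b :: r => congrArg (a :: ·) (updLast_id f h (b :: r))

lemma map_updLast {α β : Type} (f : α → β) (g : α → α) (h : β → β)
    (hc : ∀ x, f (g x) = h (f x)) (xs : List α) :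
    (updLast g xs).map f = updLast h (xs.map f) := by
  induction xs with
  | nil => rfl
  | cons a t ih =>
    cases t with
    | nil => simp only [updLast, List.map, hc]
    | cons b r =>
      simp only [updLast, List.map, List.cons.injEq, true_and]
      exact ih

-- starting a new group formats to exactly the split header
lemma finRec_nil (line : String) :
    finRec (line, []) = splitBar (PySem.Str.rstrip line) := by
  unfold finRec
  exact updLast_id _ (fun s => by simp [List.foldl]) _

-- appending a continuation line to a group appends its rstrip to the record's last field
lemma finRec_snoc (f : String) (cs : List String) (l : String) :
    finRec (f, cs ++ [l]) = updLast (fun s => s ++ PySem.Str.rstrip l) (finRec (f, cs)) := by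
  unfold finRec
  rw [updLast_updLast]
  apply updLast_congr
  intro s
  simp [List.foldl_append, List.foldl, String.append_assoc]

-- loop invariant: A's accumulator is B's list of groups, formatted
lemma fold_eq (link : List String) :
    ∀ groups : List (String × List String),
      link.foldl aStep (groups.map finRec) = (link.foldl bStep groups).map finRec := by
  induction link with
  | nil => intro groups; rfl
  | cons line rest ih =>
    intro groups
    simp only [List.foldl]
    by_cases h1 : line == "\n"
    · simp only [aStep, bStep, h1, if_pos]; exact ih groups
    · cases hg : PySem.Str.pyGet? line 0 with
      | none =>
        simp only [aStep, bStep, h1, Bool.false_eq_true, not_false_iff, if_neg, hg]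
        exact ih groups
      | some c =>
        by_cases h2 : (PySem.Chars.isdigit c || (PySem.Chars.lowerChar c == 'o')) = true
        · simp only [aStep, bStep, h1, hg, h2, if_pos, Bool.false_eq_true, not_false_iff, if_neg]
          have hh : (groups ++ [(line, [])]).map finRec
              = groups.map finRec ++ [splitBar (PySem.Str.rstrip line)] := by
            simp [finRec_nil]
          rw [← hh, ih]
        · simp only [aStep, bStep, h1, hg, h2, Bool.false_eq_true, not_false_iff, if_neg]
          have hh : (updLast (fun g => (g.1, g.2 ++ [line])) groups).map finRec
              = updLast (updLast (fun s => s ++ PySem.Str.rstrip line)) (groups.map finRec) := by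
            apply map_updLast
            intro x
            exact finRec_snoc x.1 x.2 line
          rw [← hh, ih]

-- ===== VERDICT (by name: the statement is the Claim_ definition above) =====
theorem postOpen_py_spec : Claim_equal_postOpen_py := by
  intro link _ _
  unfold Spec_postOpen_py postOpen_py postOpen_py_alt
  simpa using fold_eq link []
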